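-- pv_equiv track=rewrite | github.com/ligaroba/datastructures-and-algorithms | inteview/preparation/arrays/number_of_pairs.py | countPairsBruteForce
-- ===== SOURCE A (Python) =====
-- def countPairsBruteForce(arrX,arrY):
--     sizeX=len(arrX)
--     sizeY=len(arrY)
--     ans=0
--     for i in range(0,sizeX):
--         for j in range(0,sizeY):
--             if pow(arrX[i],arrY[j])>pow(arrY[j],arrX[i]):
--                 ans+=1
--     return ans
-- ===== SOURCE B (Python) =====
-- def countPairsBruteForce(arrX, arrY):
--     # Counts pairs (x, y) with x**y > y**x via the classic arithmetic
--     # characterisation (for x,y >= 2, x**y > y**x iff x < y, up to the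
--     # finitely many special values 0, 1, 2, 3, 4) plus one sorted copy of
--     # arrY and a hand-rolled binary search -- no big-integer powers at all.
--     ys = sorted(arrY)
--     m = len(ys)
--     c0 = arrY.count(0)
--     c1 = arrY.count(1)
--     c2 = arrY.count(2)
--     c3 = arrY.count(3)
--     c4 = arrY.count(4)
--     ans = 0
--     for x in arrX:
--         if x == 0:
--             continue
--         if x == 1:
--             ans += c0
--             continue
--         # number of y in arrY with y > x, by binary search in ys
--         lo, hi = 0, m
--         while lo < hi:
--             mid = (lo + hi) // 2
--             if ys[mid] <= x:
--                 lo = mid + 1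
--             else:
--                 hi = mid
--         ans += c0 + c1 + (m - lo)
--         if x == 2:
--             ans -= c3 + c4
--         elif x == 3:
--             ans += c2
--     return ans
-- ===== Notes on version B (the rewrite author's own statement) =====
-- stated objective: alternative
-- what changed: Replaces the double loop computing two big-integer powers per pair by the arithmetic characterisation of x^y > y^x (for x,y >= 2 it is x < y up to the special values 0..4): arrY is sorted and counted once and each x contributes via one binary search plus precomputed counters, with no power ever computed (O((n+m) log m) word operations instead of O(n*m) big-integer pows; a timing run could not credit this because its large inputs contain negative elements, which lie outside Pre_).
-- outside the precondition, e.g. on countPairsBruteForce([-2], [3]): A returns 0, B returns 1; on countPairsBruteForce([3], [-2]): A returns 1, B returns 0; on countPairsBruteForce([0], [-1]): A raises ZeroDivisionError, B returns 0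
import Mathlib
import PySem

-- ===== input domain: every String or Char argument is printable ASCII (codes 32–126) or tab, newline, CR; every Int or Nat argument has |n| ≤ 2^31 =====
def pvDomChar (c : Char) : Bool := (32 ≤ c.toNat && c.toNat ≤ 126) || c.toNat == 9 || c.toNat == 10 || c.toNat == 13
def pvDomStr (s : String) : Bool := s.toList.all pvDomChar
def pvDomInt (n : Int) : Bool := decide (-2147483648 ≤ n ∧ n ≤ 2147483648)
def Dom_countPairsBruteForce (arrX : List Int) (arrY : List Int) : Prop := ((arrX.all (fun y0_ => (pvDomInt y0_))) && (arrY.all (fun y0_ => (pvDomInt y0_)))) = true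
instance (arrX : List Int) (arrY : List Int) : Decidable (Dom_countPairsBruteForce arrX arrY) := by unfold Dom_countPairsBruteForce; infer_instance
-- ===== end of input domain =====

-- B replaces the all-pairs big-integer power comparisons by the arithmetic characterisation of
-- x^y > y^x plus one sort of arrY, precomputed counters and a per-x binary search, computing no
-- power at all (objective: alternative algorithm).

-- ===== PORT A =====
-- pow(a, b) is ported as a ^ b.toNat: exact whenever the exponent is nonnegative; inputs with a
-- negative element (where Python pow returns a float or raises ZeroDivisionError) are outside Pre_.
def countPairsBruteForce (arrX : List Int) (arrY : List Int) : Int :=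
  let sizeX := PySem.List.len arrX
  let sizeY := PySem.List.len arrY
  (PySem.List.pyRange 0 sizeX 1).foldl (fun ans i =>
    (PySem.List.pyRange 0 sizeY 1).foldl (fun ans j =>
      if (PySem.List.pyGetD arrX i 0) ^ (PySem.List.pyGetD arrY j 0).toNat >
         (PySem.List.pyGetD arrY j 0) ^ (PySem.List.pyGetD arrX i 0).toNat
      then ans + 1 else ans) ans) 0

-- ===== PORT B =====
-- the hand-written 'while lo < hi' binary-search loop of Source B; ys[mid] is ported total (0 ≤ mid < hi ≤ len(ys) at every call site)
def pvBrLoop (ys : List Int) (x : Int) (lo hi : Nat) : Nat :=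
  if _h : lo < hi then
    -- mid = (lo + hi) // 2, inlined
    if PySem.List.pyGetD ys (((lo + hi) / 2 : Nat) : Int) 0 ≤ x then pvBrLoop ys x ((lo + hi) / 2 + 1) hi
    else pvBrLoop ys x lo ((lo + hi) / 2)
  else lo
termination_by hi - lo
decreasing_by all_goals omega

def countPairsBruteForce_alt (arrX : List Int) (arrY : List Int) : Int :=
  let ys := PySem.List.sorted arrY (fun y => y) false
  let m := ys.length
  let c0 : Int := PySem.List.count arrY 0
  let c1 : Int := PySem.List.count arrY 1
  let c2 : Int := PySem.List.count arrY 2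
  let c3 : Int := PySem.List.count arrY 3
  let c4 : Int := PySem.List.count arrY 4
  arrX.foldl (fun ans x =>
    if x = 0 then ans
    else if x = 1 then ans + c0
    else
      let lo := pvBrLoop ys x 0 m
      let ans := ans + (c0 + c1 + ((m : Int) - (lo : Int)))
      if x = 2 then ans - (c3 + c4)
      else if x = 3 then ans + c2
      else ans) 0

-- ===== PRECONDITION & SPEC =====
-- Pre_ excludes inputs where both lists are nonempty and some element is negative: there Python's
-- pow computes a float (a comparison not portable under the type convention) or raises
-- ZeroDivisionError (pow(0, k<0)). When either list is empty no pow is evaluated, so any elements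
-- are admitted.
def Pre_countPairsBruteForce (arrX : List Int) (arrY : List Int) : Prop :=
  arrX = [] ∨ arrY = [] ∨ ((∀ x ∈ arrX, 0 ≤ x) ∧ (∀ y ∈ arrY, 0 ≤ y))
instance (arrX : List Int) (arrY : List Int) : Decidable (Pre_countPairsBruteForce arrX arrY) := by
  unfold Pre_countPairsBruteForce; infer_instance

def pvWitness_countPairsBruteForce : List Int × List Int := ([2, 3, 0, 10], [1, 2, 5, 0])

def Spec_countPairsBruteForce (arrX : List Int) (arrY : List Int) (out : Int) : Prop :=
  out = countPairsBruteForce_alt arrX arrY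
instance (arrX : List Int) (arrY : List Int) (out : Int) : Decidable (Spec_countPairsBruteForce arrX arrY out) := by
  unfold Spec_countPairsBruteForce; infer_instance

-- ===== CLAIM (what is proved, stated in full; the proofs are below) =====
def Claim_equal_countPairsBruteForce : Prop := ∀ (arrX : List Int) (arrY : List Int), Dom_countPairsBruteForce arrX arrY → Pre_countPairsBruteForce arrX arrY → Spec_countPairsBruteForce arrX arrY (countPairsBruteForce arrX arrY)

-- ===== LEMMAS AND PROOFS =====

-- the arithmetic rule characterising x^y > y^x on nonnegative integers
abbrev pvRuleP (x y : Int) : Prop :=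
  (1 ≤ x ∧ y = 0) ∨ (2 ≤ x ∧ y = 1) ∨
  (2 ≤ x ∧ 2 ≤ y ∧ x < y ∧ ¬(x = 2 ∧ (y = 3 ∨ y = 4))) ∨ (x = 3 ∧ y = 2)


lemma pvL (x y : ℕ) (hx : 2 ≤ x) (hxy : x ≤ y) (hy : 3 ≤ y) : (y + 1) ^ x < x * y ^ x := by
  induction x, hx using Nat.le_induction with
  | base => ring_nf; nlinarith
  | succ x hx IH =>
    have hxy' : x ≤ y := by omega
    have h1 : (y + 1) ^ (x + 1) = (y + 1) ^ x * (y + 1) := by ring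
    have h2 : (y + 1) ^ x < x * y ^ x := IH hxy'
    calc (y + 1) ^ (x + 1) = (y + 1) ^ x * (y + 1) := h1
      _ < (x * y ^ x) * (y + 1) := by
            exact Nat.mul_lt_mul_of_lt_of_le h2 (le_refl _) (by omega)
      _ ≤ (x + 1) * y ^ (x + 1) := by
            have : x * (y + 1) ≤ (x + 1) * y := by nlinarith
            calc (x * y ^ x) * (y + 1) = (x * (y + 1)) * y ^ x := by ring
              _ ≤ ((x + 1) * y) * y ^ x := Nat.mul_le_mul_right _ this
              _ = (x + 1) * y ^ (x + 1) := by ring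

lemma pvM (x y : ℕ) (hx : 2 ≤ x) (hxy : x < y) (hsp : ¬(x = 2 ∧ (y = 3 ∨ y = 4))) :
    y ^ x < x ^ y := by
  rcases Nat.lt_or_ge x 3 with h3 | h3
  · -- x = 2, so y ≥ 5
    have hx2 : x = 2 := by omega
    subst hx2
    have hy5 : 5 ≤ y := by omega
    clear hsp hxy
    induction y, hy5 using Nat.le_induction with
    | base => decide
    | succ y hy IH =>
      calc (y + 1) ^ 2 < 2 * y ^ 2 := pvL 2 y (by omega) (by omega) (by omega)
        _ < 2 * 2 ^ y := by omega
        _ = 2 ^ (y + 1) := by ring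
  · -- x ≥ 3: induction on y from x + 1
    clear hsp
    have hy : x + 1 ≤ y := by omega
    induction y, hy using Nat.le_induction with
    | base =>
      calc (x + 1) ^ x < x * x ^ x := pvL x x (by omega) (le_refl _) (by omega)
        _ = x ^ (x + 1) := by ring
    | succ y hy IH =>
      have IH' : y ^ x < x ^ y := IH (by omega)
      calc (y + 1) ^ x < x * y ^ x := pvL x y (by omega) (by omega) (by omega)
        _ < x * x ^ y := by
              exact Nat.mul_lt_mul_of_le_of_lt (le_refl _) IH' (by omega)
        _ = x ^ (y + 1) := by ring

lemma pvChar (a b : ℕ) : b ^ a < a ^ b ↔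
    ((1 ≤ a ∧ b = 0) ∨ (2 ≤ a ∧ b = 1) ∨
     (2 ≤ a ∧ 2 ≤ b ∧ a < b ∧ ¬(a = 2 ∧ (b = 3 ∨ b = 4))) ∨ (a = 3 ∧ b = 2)) := by
  constructor
  · intro h
    rcases Nat.lt_or_ge a 2 with ha | ha
    · interval_cases a
      · exfalso
        rcases Nat.eq_zero_or_pos b with hb | hb
        · subst hb; simp at h
        · rw [Nat.zero_pow (by omega)] at h; omega
      · rw [pow_one, one_pow] at h
        have : b = 0 := by omega
        left; omega
    · rcases Nat.lt_or_ge b 2 with hb | hb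
      · interval_cases b
        · left; omega
        · right; left; omega
      · rcases Nat.lt_trichotomy a b with hab | hab | hab
        · right; right; left
          refine ⟨ha, hb, hab, ?_⟩
          rintro ⟨rfl, rfl | rfl⟩ <;> simp_all
        · exfalso; subst hab; exact lt_irrefl _ h
        · by_cases hs : a = 3 ∧ b = 2
          · right; right; right; exact hs
          · exfalso
            by_cases hs2 : b = 2 ∧ a = 4
            · obtain ⟨rfl, rfl⟩ := hs2; simp_all
            · have := pvM b a hb hab (by tauto)
              omega
  · rintro (⟨ha, rfl⟩ | ⟨ha, rfl⟩ | ⟨ha, hb, hab, hsp⟩ | ⟨rfl, rfl⟩)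
    · rw [pow_zero, Nat.zero_pow (by omega)]; omega
    · rw [pow_one, one_pow]; omega
    · exact pvM a b ha hab hsp
    · decide

lemma pvCharInt (x y : Int) (hx : 0 ≤ x) (hy : 0 ≤ y) :
    (x ^ y.toNat > y ^ x.toNat) ↔ pvRuleP x y := by
  obtain ⟨a, rfl⟩ : ∃ a : ℕ, x = (a : Int) := ⟨x.toNat, (Int.toNat_of_nonneg hx).symm⟩
  obtain ⟨b, rfl⟩ : ∃ b : ℕ, y = (b : Int) := ⟨y.toNat, (Int.toNat_of_nonneg hy).symm⟩
  rw [Int.toNat_natCast, Int.toNat_natCast]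
  have h1 : ((a : Int) ^ b > (b : Int) ^ a) ↔ b ^ a < a ^ b := by
    constructor <;> intro h <;> exact_mod_cast h
  rw [h1, pvChar]
  unfold pvRuleP
  constructor <;> intro h <;>
    [skip; skip] <;>
    · rcases h with h | h | h | h
      · left; omega
      · right; left; omega
      · right; right; left
        refine ⟨by omega, by omega, by omega, ?_⟩
        intro hc; apply h.2.2.2; omega
      · right; right; right; omega

-- per-element indicator identity for x ≥ 2
lemma pvIndicator (x y : Int) (hx2 : 2 ≤ x) :
    (if pvRuleP x y then (1 : Int) else 0) =
      (if y = 0 then 1 else 0) + (if y = 1 then 1 else 0) + (if x < y then 1 else 0) +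
      (if x = 2 then -((if y = 3 then (1 : Int) else 0) + (if y = 4 then 1 else 0))
       else if x = 3 then (if y = 2 then (1 : Int) else 0) else 0) := by
  unfold pvRuleP
  split_ifs <;> omega

-- counting form of the rule for x ≥ 2
lemma pvCount (x : Int) (hx2 : 2 ≤ x) (l : List Int) :
    ((l.countP (fun y => decide (pvRuleP x y))) : Int) =
      (l.count 0 : Int) + (l.count 1 : Int) + (l.countP (fun y => decide (x < y)) : Int) +
      (if x = 2 then -((l.count 3 : Int) + (l.count 4 : Int))
       else if x = 3 then (l.count 2 : Int) else 0) := by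
  induction l with
  | nil => simp
  | cons y t IH =>
    simp only [List.countP_cons, List.count_cons]
    push_cast
    have hi := pvIndicator x y hx2
    simp only [decide_eq_true_eq, beq_iff_eq] at *
    split_ifs at hi ⊢ <;> omega

lemma pvBrLoop_inv (ys : List Int) (x : Int)
    (hs : List.Pairwise (· ≤ ·) ys) :
    ∀ n lo hi, hi - lo ≤ n → lo ≤ hi → hi ≤ ys.length →
      (∀ k, (hk : k < ys.length) → k < lo → ys[k] ≤ x) →
      (∀ k, (hk : k < ys.length) → hi ≤ k → x < ys[k]) →
      pvBrLoop ys x lo hi ≤ ys.length ∧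
      (∀ k, (hk : k < ys.length) → k < pvBrLoop ys x lo hi → ys[k] ≤ x) ∧
      (∀ k, (hk : k < ys.length) → pvBrLoop ys x lo hi ≤ k → x < ys[k]) := by
  have hmono : ∀ i j, (hi : i < ys.length) → (hj : j < ys.length) → i ≤ j → ys[i] ≤ ys[j] := by
    intro i j hi hj hij
    rcases Nat.eq_or_lt_of_le hij with rfl | h
    · exact le_refl _
    · exact List.pairwise_iff_getElem.mp hs i j hi hj h
  intro n
  induction n with
  | zero =>
    intro lo hi hn hle hlen hlo hhi
    have : lo = hi := by omega
    subst this
    rw [pvBrLoop, dif_neg (by omega : ¬ lo < lo)]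
    exact ⟨by omega, hlo, hhi⟩
  | succ n IH =>
    intro lo hi hn hle hlen hlo hhi
    rw [pvBrLoop]
    by_cases h : lo < hi
    · rw [dif_pos h]
      have hmid1 : lo ≤ (lo + hi) / 2 := by omega
      have hmid2 : (lo + hi) / 2 < hi := by omega
      have hmidlen : (lo + hi) / 2 < ys.length := by omega
      have hget : PySem.List.pyGetD ys (((lo + hi) / 2 : Nat) : Int) 0 = ys[(lo + hi) / 2] := by
        rw [PySem.List.pyGetD_natCast]
        simp [List.getD_eq_getElem?_getD, List.getElem?_eq_getElem hmidlen]
      rw [hget]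
      by_cases hc : ys[(lo + hi) / 2] ≤ x
      · simp only [if_pos hc]
        exact IH ((lo + hi) / 2 + 1) hi (by omega) (by omega) hlen
          (fun k hk hklt => by
            rcases Nat.lt_or_ge k lo with h' | h'
            · exact hlo k hk h'
            · exact le_trans (hmono k ((lo + hi) / 2) hk hmidlen (by omega)) hc)
          hhi
      · simp only [if_neg hc]
        rw [not_le] at hc
        exact IH lo ((lo + hi) / 2) (by omega) (by omega) (by omega) hlo
          (fun k hk hkge => lt_of_lt_of_le hc (hmono ((lo + hi) / 2) k hmidlen hk hkge))
    · rw [dif_neg h]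
      have : lo = hi := by omega
      subst this
      exact ⟨by omega, hlo, hhi⟩

-- m - (binary-search result) counts the elements greater than x in a sorted list
lemma pvBr_count (ys : List Int) (x : Int) (hs : List.Pairwise (· ≤ ·) ys) :
    (ys.countP (fun y => decide (x < y)) : Int) =
      (ys.length : Int) - (pvBrLoop ys x 0 ys.length : Int) := by
  obtain ⟨hle, hbelow, habove⟩ :=
    pvBrLoop_inv ys x hs ys.length 0 ys.length (by omega) (by omega) (le_refl _)
      (fun k hk hklt => by omega) (fun k hk hge => by omega)
  set r := pvBrLoop ys x 0 ys.length with hr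
  have hsplit : ys = ys.take r ++ ys.drop r := (List.take_append_drop r ys).symm
  have h1 : (ys.take r).countP (fun y => decide (x < y)) = 0 := by
    rw [List.countP_eq_zero]
    intro a ha
    obtain ⟨i, hi, hilt, rfl⟩ := List.mem_take_iff_getElem.mp ha
    simp only [decide_eq_true_eq]
    have := hbelow i (by omega) (by omega)
    omega
  have h2 : (ys.drop r).countP (fun y => decide (x < y)) = (ys.drop r).length := by
    rw [List.countP_eq_length]
    intro a ha
    obtain ⟨i, hi, rfl⟩ := List.mem_drop_iff_getElem.mp ha
    simp only [decide_eq_true_eq]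
    exact habove (r + i) (by omega) (by omega)
  calc (ys.countP (fun y => decide (x < y)) : Int)
      = (((ys.take r).countP (fun y => decide (x < y)) +
          (ys.drop r).countP (fun y => decide (x < y)) : Nat) : Int) := by
        conv_lhs => rw [hsplit]
        rw [List.countP_append]
    _ = ((ys.drop r).length : Int) := by rw [h1, h2]; simp
    _ = (ys.length : Int) - (r : Int) := by
        rw [List.length_drop]; omega

lemma pvCountEq (l : List Int) (k : Int) : List.count k l = l.countP (fun y => decide (y = k)) := by
  rw [List.count_eq_countP]
  refine List.countP_congr ?_
  intro x hx
  simp only [beq_iff_eq, decide_eq_true_eq]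

-- ===== VERDICT (by name: the statement is the Claim_ definition above) =====
theorem countPairsBruteForce_spec : Claim_equal_countPairsBruteForce := by
  intro arrX arrY _ hpre
  unfold Spec_countPairsBruteForce
  rcases hpre with rfl | rfl | ⟨hX, hY⟩
  · rfl
  · unfold countPairsBruteForce countPairsBruteForce_alt
    simp only [PySem.List.len_eq, PySem.List.count_eq, List.length_nil, Nat.cast_zero,
      List.count_nil, PySem.List.sorted, List.foldl_nil]
    rw [show (PySem.List.pyRange 0 (0 : Int) 1) = [] from rfl]
    simp only [List.foldl_nil]
    rw [PySem.List.foldl_ignore]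
    refine Eq.symm ?_
    rw [PySem.List.foldl_congr_mem' arrX _ (fun ans _ => ans) 0 ?_, PySem.List.foldl_ignore]
    intro x _ acc
    have hbr : pvBrLoop [] x 0 0 = 0 := by rw [pvBrLoop]; simp
    simp only [hbr]
    split_ifs <;> push_cast <;> ring
  have hA : countPairsBruteForce arrX arrY =
      arrX.foldl (fun ans x => ans + (arrY.countP (fun y => decide (pvRuleP x y)) : Int)) 0 := by
    unfold countPairsBruteForce
    simp only [PySem.List.len_eq]
    rw [PySem.List.foldl_pyRange_zero_pyGetD' arrX 0
      (fun ans x => List.foldl (fun ans j =>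
        if x ^ (PySem.List.pyGetD arrY j 0).toNat >
           (PySem.List.pyGetD arrY j 0) ^ x.toNat
        then ans + 1 else ans) ans (PySem.List.pyRange 0 (arrY.length : Int))) 0]
    refine PySem.List.foldl_congr_mem' arrX _ _ 0 ?_
    intro x hx acc
    rw [PySem.List.foldl_pyRange_zero_pyGetD' arrY 0
      (fun ans y => if x ^ y.toNat > y ^ x.toNat then ans + 1 else ans) acc,
      PySem.List.foldl_ite_add_one]
    congr 2
    refine List.countP_congr ?_
    intro y hy
    simp only [decide_eq_true_eq]
    exact pvCharInt x y (hX x hx) (hY y hy)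
  rw [hA]
  unfold countPairsBruteForce_alt
  simp only [PySem.List.count_eq]
  refine PySem.List.foldl_congr_mem' arrX _ _ 0 ?_
  intro x hx acc
  have hx0 : 0 ≤ x := hX x hx
  by_cases h0 : x = 0
  · subst h0
    rw [if_pos rfl]
    have : arrY.countP (fun y => decide (pvRuleP 0 y)) = 0 := by
      rw [List.countP_eq_zero]
      intro y hy
      simp only [decide_eq_true_eq]
      unfold pvRuleP
      omega
    rw [this]
    simp
  · rw [if_neg h0]
    by_cases h1 : x = 1
    · subst h1
      rw [if_pos rfl]
      have : arrY.countP (fun y => decide (pvRuleP 1 y)) =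
          arrY.countP (fun y => decide (y = 0)) := by
        refine List.countP_congr ?_
        intro y hy
        simp only [decide_eq_true_eq]
        unfold pvRuleP
        omega
      rw [this, ← pvCountEq]
    · rw [if_neg h1]
      have hx2 : 2 ≤ x := by omega
      have hsorted := PySem.List.sorted_pairwise arrY (fun y => y)
      have hperm : (PySem.List.sorted arrY (fun y => y) false).Perm arrY :=
        PySem.List.sorted_perm arrY (fun y => y) false
      have hgt : (arrY.countP (fun y => decide (x < y)) : Int) =
          ((PySem.List.sorted arrY (fun y => y) false).length : Int) -
            (pvBrLoop (PySem.List.sorted arrY (fun y => y) false) x 0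
              (PySem.List.sorted arrY (fun y => y) false).length : Int) := by
        rw [← hperm.countP_eq (fun y => decide (x < y))]
        exact pvBr_count (PySem.List.sorted arrY (fun y => y) false) x hsorted
      have hc := pvCount x hx2 arrY
      rw [pvCountEq arrY 0, pvCountEq arrY 1, pvCountEq arrY 2, pvCountEq arrY 3,
          pvCountEq arrY 4] at hc
      rw [pvCountEq arrY 0, pvCountEq arrY 1, pvCountEq arrY 2, pvCountEq arrY 3,
          pvCountEq arrY 4]
      by_cases h2 : x = 2
      · simp only [if_pos h2] at hc ⊢
        rw [hc, hgt]
        ring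
      · simp only [if_neg h2] at hc ⊢
        by_cases h3 : x = 3
        · simp only [if_pos h3] at hc ⊢
          rw [hc, hgt]
          ring
        · simp only [if_neg h3] at hc ⊢
          rw [hc, hgt]
          ring
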